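-- pv_equiv track=rewrite | github.com/fecgov/fecfile-image-generator | routes/src/f3x/helper.py | calculate_page_count
-- ===== SOURCE A (Python) =====
-- import math
--
-- def calculate_page_count(schedules, num):
--
--     sch_count = memo_sch_count = 0
--     sch_page_count = memo_sch_page_count = 0
--
--     for schedule in schedules:
--         sch_count += 1
--         if schedule.get("memoDescription"):
--             memo_sch_count += 1
--
--         if sch_count == num:
--             sch_page_count += 1
--             memo_sch_page_count += math.ceil(memo_sch_count / 2)
--             sch_count = 0
--             memo_sch_count = 0
--
--     if sch_count:
--         sch_page_count += 1
--
--     if memo_sch_count: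
--         memo_sch_page_count += 1
--
--     return sch_page_count, memo_sch_page_count
-- ===== SOURCE B (Python) =====
-- def calculate_page_count(schedules, num):
--     # Group-wise decomposition: split the schedules into pages of size num
--     # (plus a possibly shorter trailing page) instead of counting with a
--     # running per-page counter that resets.
--     def has_memo(schedule):
--         return bool(schedule.get("memoDescription"))
--
--     if num <= 0:
--         # a full page of size num can never be completed: everything that
--         # exists forms one trailing partial page
--         if not schedules:
--             return 0, 0
--         return 1, 1 if any(has_memo(s) for s in schedules) else 0
--
--     sch_page_count = memo_sch_page_count = 0
--     rest = schedules
--     while rest: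
--         group, rest = rest[:num], rest[num:]
--         sch_page_count += 1
--         memos = sum(1 for s in group if has_memo(s))
--         if len(group) == num:
--             memo_sch_page_count += (memos + 1) // 2
--         elif memos:
--             memo_sch_page_count += 1
--     return sch_page_count, memo_sch_page_count
-- ===== Notes on version B (the rewrite author's own statement) =====
-- stated objective: alternative
-- what changed: Replaces the element-wise loop with a resetting per-page counter by a group-wise decomposition: split the schedules into pages of size num (slice off num at a time), count ceil(memos/2) per full page and 1 for a non-empty-memo trailing partial page; non-positive num is handled up front as one trailing partial page.
import Mathlib
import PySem

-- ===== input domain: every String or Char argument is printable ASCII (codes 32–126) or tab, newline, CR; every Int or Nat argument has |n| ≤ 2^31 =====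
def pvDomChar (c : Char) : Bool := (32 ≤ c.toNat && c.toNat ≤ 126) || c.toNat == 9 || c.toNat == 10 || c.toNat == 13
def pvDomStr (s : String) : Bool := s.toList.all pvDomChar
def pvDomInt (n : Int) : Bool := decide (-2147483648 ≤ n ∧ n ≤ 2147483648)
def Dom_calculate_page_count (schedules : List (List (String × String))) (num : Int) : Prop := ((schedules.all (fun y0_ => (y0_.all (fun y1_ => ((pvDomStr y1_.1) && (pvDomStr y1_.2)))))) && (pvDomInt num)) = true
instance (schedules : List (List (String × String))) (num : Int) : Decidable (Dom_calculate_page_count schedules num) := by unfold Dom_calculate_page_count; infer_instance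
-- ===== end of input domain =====

-- B replaces A's element-wise resetting-counter loop by a group-wise (page-by-page
-- slicing) decomposition of the same computation; objective: alternative, same cost.


-- ===== PORT A =====
-- schedule.get("memoDescription") is truthy iff the key is present with a non-empty value
def pvMemoTruthy (schedule : List (String × String)) : Bool :=
  match (PySem.Dict.ofList schedule).get? "memoDescription" with
  | some v => v ≠ ""
  | none => false

-- loop body of A: state (sch_count, memo_sch_count, sch_page_count, memo_sch_page_count);
-- math.ceil(mc / 2) is ported as (mc + 1) / 2, exact since the running count mc is nonnegative
def pvStepA (num : Int) (st : Int × Int × Int × Int) (schedule : List (String × String)) :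
    Int × Int × Int × Int :=
  let sc := st.1 + 1
  let mc := if pvMemoTruthy schedule then st.2.1 + 1 else st.2.1
  if sc = num then (0, 0, st.2.2.1 + 1, st.2.2.2 + (mc + 1) / 2)
  else (sc, mc, st.2.2.1, st.2.2.2)

def calculate_page_count (schedules : List (List (String × String))) (num : Int) : Int × Int :=
  let st := schedules.foldl (pvStepA num) (0, 0, 0, 0)
  ((if st.1 ≠ 0 then st.2.2.1 + 1 else st.2.2.1),
   (if st.2.1 ≠ 0 then st.2.2.2 + 1 else st.2.2.2))

-- ===== PORT B =====
-- memos = sum(1 for s in group if has_memo(s))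
def pvMemos (group : List (List (String × String))) : Int :=
  group.foldl (fun c s => if pvMemoTruthy s then c + 1 else c) 0

-- the while-loop of B: slice off one page of size n at a time (n = num.toNat > 0)
def pvBLoop : List (List (String × String)) → (n : Nat) → 0 < n → Int → Int → Int × Int
  | [], _, _, sp, mp => (sp, mp)
  | x :: t, n, hn, sp, mp =>
    let group := (x :: t).take n
    let rest' := (x :: t).drop n
    let memos := pvMemos group
    let mp' := if group.length = n then mp + (memos + 1) / 2
               else if memos ≠ 0 then mp + 1 else mp
    pvBLoop rest' n hn (sp + 1) mp'
termination_by rest _ _ _ _ => rest.length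
decreasing_by simp only [List.length_drop, List.length_cons]; omega

def calculate_page_count_alt (schedules : List (List (String × String))) (num : Int) :
    Int × Int :=
  if h : num ≤ 0 then
    if schedules = [] then (0, 0)
    else (1, if schedules.any pvMemoTruthy then 1 else 0)
  else
    pvBLoop schedules num.toNat (by omega) 0 0

-- ===== PRECONDITION & SPEC =====
def Spec_calculate_page_count (schedules : List (List (String × String))) (num : Int) (out : Int × Int) : Prop := out = calculate_page_count_alt schedules num
instance (schedules : List (List (String × String))) (num : Int) (out : Int × Int) : Decidable (Spec_calculate_page_count schedules num out) := by unfold Spec_calculate_page_count; infer_instance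

-- ===== CLAIM (what is proved, stated in full; the proofs are below) =====
def Claim_equal_calculate_page_count : Prop := ∀ (schedules : List (List (String × String))) (num : Int), Dom_calculate_page_count schedules num → Spec_calculate_page_count schedules num (calculate_page_count schedules num)

-- ===== LEMMAS AND PROOFS =====

-- pvMemos with shifted initial accumulator
lemma pvMemos_init (xs : List (List (String × String))) (c : Int) :
    xs.foldl (fun c s => if pvMemoTruthy s then c + 1 else c) c = c + pvMemos xs := by
  induction xs generalizing c with
  | nil => simp [pvMemos]
  | cons x t ih =>
    simp only [pvMemos, List.foldl_cons]
    rw [ih, ih (if pvMemoTruthy x then (0 : Int) + 1 else 0)]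
    simp only [pvMemos]
    split_ifs <;> omega

lemma pvMemos_cons (x : List (String × String)) (t : List (List (String × String))) :
    pvMemos (x :: t) = (if pvMemoTruthy x then 1 else 0) + pvMemos t := by
  simp only [pvMemos, List.foldl_cons]
  rw [pvMemos_init]
  simp only [pvMemos]
  split_ifs <;> omega

lemma pvMemos_nonneg (xs : List (List (String × String))) : 0 ≤ pvMemos xs := by
  induction xs with
  | nil => simp [pvMemos]
  | cons x t ih => rw [pvMemos_cons]; split_ifs <;> omega

lemma pvMemos_ne_zero_iff_any (xs : List (List (String × String))) :
    (pvMemos xs ≠ 0) ↔ xs.any pvMemoTruthy = true := by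
  induction xs with
  | nil => simp [pvMemos]
  | cons x t ih =>
    rw [pvMemos_cons]
    have ht := pvMemos_nonneg t
    by_cases hx : pvMemoTruthy x = true
    · simp only [hx, if_true, List.any_cons, Bool.true_or, iff_true]
      omega
    · have hx' : pvMemoTruthy x = false := by simpa using hx
      simp only [hx', List.any_cons, Bool.false_or, Bool.false_eq_true, if_false, zero_add]
      exact ih

-- A's loop never fires the reset while the counter stays strictly below num
lemma foldA_no_reset (xs : List (List (String × String))) (num : Int) :
    ∀ sc mc sp mp : Int, 0 ≤ sc → (num ≤ 0 ∨ sc + xs.length < num) →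
    xs.foldl (pvStepA num) (sc, mc, sp, mp) = (sc + xs.length, mc + pvMemos xs, sp, mp) := by
  induction xs with
  | nil => intro sc mc sp mp _ _; simp [pvMemos]
  | cons x t ih =>
    intro sc mc sp mp hsc hlt
    have hne : sc + 1 ≠ num := by
      rcases hlt with h | h
      · omega
      · simp only [List.length_cons, Nat.cast_add, Nat.cast_one] at h
        omega
    simp only [List.foldl_cons, pvStepA, hne, if_false]
    rw [ih (sc + 1) (if pvMemoTruthy x then mc + 1 else mc) sp mp (by omega)
        (by rcases hlt with h | h
            · exact Or.inl h
            · right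
              simp only [List.length_cons, Nat.cast_add, Nat.cast_one] at h ⊢
              omega)]
    rw [pvMemos_cons]
    simp only [List.length_cons, Nat.cast_add, Nat.cast_one, Prod.mk.injEq]
    and_intros <;> first
      | trivial
      | omega
      | (split_ifs <;> omega)

-- A's loop over one full page of size num resets and books one page
lemma foldA_full (xs : List (List (String × String))) (num : Int) :
    ∀ sc mc sp mp : Int, 0 ≤ sc → xs ≠ [] → sc + xs.length = num →
    xs.foldl (pvStepA num) (sc, mc, sp, mp) =
      (0, 0, sp + 1, mp + (mc + pvMemos xs + 1) / 2) := by
  induction xs with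
  | nil => intro _ _ _ _ _ h _; exact absurd rfl h
  | cons x t ih =>
    intro sc mc sp mp hsc _ hlen
    simp only [List.length_cons, Nat.cast_add, Nat.cast_one] at hlen
    by_cases ht : t = []
    · subst ht
      simp only [List.length_nil, Nat.cast_zero] at hlen
      have heq : sc + 1 = num := by omega
      simp only [List.foldl_cons, pvStepA]
      rw [if_pos heq]
      simp only [List.foldl_nil]
      rw [pvMemos_cons]
      simp only [pvMemos, List.foldl_nil, Prod.mk.injEq]
      and_intros <;> first
        | trivial
        | (split_ifs <;> omega)
    · have htpos : 0 < t.length := List.length_pos_iff.mpr ht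
      have hne : sc + 1 ≠ num := by omega
      simp only [List.foldl_cons, pvStepA]
      rw [if_neg hne]
      rw [ih (sc + 1) (if pvMemoTruthy x then mc + 1 else mc) sp mp (by omega) ht (by omega)]
      rw [pvMemos_cons]
      simp only [Prod.mk.injEq]
      and_intros <;> first
        | trivial
        | (split_ifs <;> omega)

-- the two loops agree for positive num, for every value of the page accumulators,
-- by strong induction on the length of the schedule list
lemma main_gen (num : Int) (hnum : 0 < num) :
    ∀ (schedules : List (List (String × String))) (sp mp : Int),
    ((if (schedules.foldl (pvStepA num) (0, 0, sp, mp)).1 ≠ 0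
        then (schedules.foldl (pvStepA num) (0, 0, sp, mp)).2.2.1 + 1
        else (schedules.foldl (pvStepA num) (0, 0, sp, mp)).2.2.1),
     (if (schedules.foldl (pvStepA num) (0, 0, sp, mp)).2.1 ≠ 0
        then (schedules.foldl (pvStepA num) (0, 0, sp, mp)).2.2.2 + 1
        else (schedules.foldl (pvStepA num) (0, 0, sp, mp)).2.2.2)) =
      pvBLoop schedules num.toNat (by omega) sp mp := by
  intro schedules
  induction hL : schedules.length using Nat.strong_induction_on generalizing schedules with
  | _ L ih =>
  intro sp mp
  by_cases hnil : schedules = []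
  · subst hnil
    simp [pvBLoop]
  · obtain ⟨x, t, hs⟩ := List.exists_cons_of_ne_nil hnil
    subst hs
    by_cases hsmall : (x :: t).length < num.toNat
    · -- one trailing partial page
      have hrest : (x :: t).drop num.toNat = [] := List.drop_eq_nil_of_le (by omega)
      have htake : (x :: t).take num.toNat = x :: t := List.take_of_length_le (by omega)
      have hglen : ¬ ((x :: t).length = num.toNat) := by omega
      rw [foldA_no_reset (x :: t) num 0 0 sp mp le_rfl (by right; omega)]
      simp only [pvBLoop, htake, hrest]
      rw [if_neg hglen]
      have hlen0 : (((x :: t).length : Int) ≠ 0) := by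
        simp only [List.length_cons]; push_cast; omega
      simp only [zero_add, ne_eq]
      rw [if_pos hlen0]
    · -- a full page, then recurse on the rest
      have hcast : (num.toNat : Int) = num := Int.toNat_of_nonneg (by omega)
      have hfull : ((x :: t).take num.toNat).length = num.toNat := by
        simp only [List.length_take]; omega
      have htne : (x :: t).take num.toNat ≠ [] := by
        intro hh; rw [hh] at hfull; simp only [List.length_nil] at hfull; omega
      have hdrop : ((x :: t).drop num.toNat).length < L := by
        rw [← hL]; simp only [List.length_drop, List.length_cons]; omega
      -- B side: peel one full page
      simp only [pvBLoop]
      rw [if_pos hfull]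
      -- A side: split the fold at the page boundary
      conv_lhs => rw [show (x :: t) = (x :: t).take num.toNat ++ (x :: t).drop num.toNat from
        (List.take_append_drop _ _).symm]
      rw [List.foldl_append]
      rw [foldA_full ((x :: t).take num.toNat) num 0 0 sp mp le_rfl htne
            (by simp only [hfull]; omega)]
      simp only [zero_add]
      exact ih ((x :: t).drop num.toNat).length hdrop ((x :: t).drop num.toNat) rfl
        (sp + 1) (mp + (pvMemos ((x :: t).take num.toNat) + 1) / 2)

-- ===== VERDICT (by name: the statement is the Claim_ definition above) =====
theorem calculate_page_count_spec : Claim_equal_calculate_page_count := by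
  intro schedules num _
  unfold Spec_calculate_page_count calculate_page_count_alt
  by_cases h : num ≤ 0
  · rw [dif_pos h]
    simp only [calculate_page_count]
    rw [foldA_no_reset schedules num 0 0 0 0 le_rfl (Or.inl h)]
    by_cases hnil : schedules = []
    · subst hnil
      simp [pvMemos]
    · have hpos : 0 < schedules.length := List.length_pos_iff.mpr hnil
      have hlen : ((schedules.length : Int) ≠ 0) := by omega
      rw [if_neg hnil]
      simp only [zero_add, ne_eq]
      rw [if_pos hlen]
      by_cases hm : pvMemos schedules = 0
      · have hany : ¬ schedules.any pvMemoTruthy = true := by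
          rw [← pvMemos_ne_zero_iff_any]; omega
        rw [if_neg (by omega : ¬ pvMemos schedules ≠ 0), if_neg hany]
      · rw [if_pos (by omega : pvMemos schedules ≠ 0),
            if_pos ((pvMemos_ne_zero_iff_any schedules).mp hm)]
  · rw [dif_neg h]
    simp only [calculate_page_count]
    exact main_gen num (by omega) schedules 0 0
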